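-- pv_equiv track=rewrite | github.com/TSS99/Quantum_Digital_Signature_Yin_et_al. | qds_beginner.py | gf2_poly_pow_mod
-- ===== SOURCE A (Python) =====
-- def poly_degree(poly_int: int) -> int:
--     """Return the degree of a GF(2) polynomial encoded as integer.
--
--     Bit k of poly_int = coefficient of x^k.
--     Degree = position of highest set bit. Returns -1 for zero polynomial.
--
--     Args:
--         poly_int (int): Polynomial as non-negative integer.
--
--     Returns:
--         int: Degree (>= 0) or -1 if poly_int == 0.
--
--     Examples:
--         poly_degree(0b10011) == 4   # x^4 + x + 1
--         poly_degree(0)       == -1  # zero polynomial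
--     """
--     return poly_int.bit_length() - 1
--
-- def gf2_poly_mod(a: int, b: int) -> int:
--     """Compute a(x) mod b(x) over GF(2) via bit-manipulation synthetic division.
--
--     All coefficient arithmetic is mod 2 (XOR). The algorithm repeatedly XORs
--     the dividend with a shifted divisor until the remainder has smaller degree.
--
--     Args:
--         a (int): Dividend polynomial as integer.
--         b (int): Divisor polynomial as integer. Must not be 0.
--
--     Returns:
--         int: Remainder r(x) such that a(x) = q(x)*b(x) + r(x) over GF(2),
--             with deg(r) < deg(b).
--
--     Raises:
--         ValueError: If b == 0.
--
--     Example: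
--         gf2_poly_mod(0b11001, 0b10011) == 10  # 0b01010 = x^3 + x
--     """
--     if b == 0:
--         raise ValueError("Divisor polynomial must not be zero.")
--     deg_b = poly_degree(b)
--     r = a
--     while True:
--         deg_r = poly_degree(r)
--         if deg_r < deg_b:
--             break
--         r ^= b << (deg_r - deg_b)
--     return r
--
-- def gf2_poly_mul(a: int, b: int) -> int:
--     """Multiply two GF(2) polynomials (no modular reduction).
--
--     Uses the shift-and-XOR algorithm: if bit k of a is set, XOR result
--     with (b << k). All arithmetic is over GF(2).
--
--     Args:
--         a (int): First polynomial as integer.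
--         b (int): Second polynomial as integer.
--
--     Returns:
--         int: Product a(x)*b(x) over GF(2). Degree = deg(a) + deg(b).
--
--     Example:
--         gf2_poly_mul(0b101, 0b11) == 0b1111   # (x^2+1)(x+1) = x^3+x^2+x+1
--     """
--     result, tb = 0, b
--     while a:
--         if a & 1:
--             result ^= tb
--         a >>= 1
--         tb <<= 1
--     return result
--
-- def gf2_poly_pow_mod(base: int, exp: int, modulus: int) -> int:
--     """Compute base(x)^exp mod modulus(x) over GF(2) via repeated squaring.
--
--     Used in Rabin's irreducibility test to compute x^(2^k) mod p(x) efficiently.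
--     Handles astronomically large exponents (e.g., 2^200).
--
--     Args:
--         base (int): Base polynomial as integer.
--         exp (int): Non-negative integer exponent.
--         modulus (int): Modulus polynomial as integer.
--
--     Returns:
--         int: (base^exp) mod modulus over GF(2).
--     """
--     result = 1
--     base = gf2_poly_mod(base, modulus)
--     while exp > 0:
--         if exp & 1:
--             result = gf2_poly_mod(gf2_poly_mul(result, base), modulus)
--         base = gf2_poly_mod(gf2_poly_mul(base, base), modulus)
--         exp >>= 1
--     return result
-- ===== SOURCE B (Python) =====
-- def poly_degree(poly_int: int) -> int:
--     return poly_int.bit_length() - 1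
--
-- def gf2_poly_mod(a: int, b: int) -> int:
--     if b == 0:
--         raise ValueError("Divisor polynomial must not be zero.")
--     deg_b = poly_degree(b)
--     r = a
--     while True:
--         deg_r = poly_degree(r)
--         if deg_r < deg_b:
--             break
--         r ^= b << (deg_r - deg_b)
--     return r
--
-- def gf2_poly_mul(a: int, b: int) -> int:
--     result, tb = 0, b
--     while a:
--         if a & 1:
--             result ^= tb
--         a >>= 1
--         tb <<= 1
--     return result
--
-- def gf2_poly_pow_mod(base: int, exp: int, modulus: int) -> int:
--     """base(x)^exp mod modulus(x) over GF(2), by divide-and-conquer on the exponent."""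
--     b0 = gf2_poly_mod(base, modulus)
--
--     def pw(e: int) -> int:
--         if e <= 0:
--             return 1
--         h = pw(e >> 1)
--         s = gf2_poly_mod(gf2_poly_mul(h, h), modulus)
--         if e & 1:
--             s = gf2_poly_mod(gf2_poly_mul(s, b0), modulus)
--         return s
--
--     return pw(exp)
-- ===== Notes on version B (the rewrite author's own statement) =====
-- stated objective: alternative
-- what changed: Replaced A's LSB-first square-and-multiply loop (result accumulator plus running square threaded through a while loop) by a direct divide-and-conquer recursion on the exponent: pw(e) squares pw(e>>1) mod modulus and multiplies by the pre-reduced base when e is odd, reusing gf2_poly_mod/gf2_poly_mul.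
-- outside the precondition, e.g. on gf2_poly_pow_mod(-10, -3, 4): A returns 1, B returns 1; on gf2_poly_pow_mod(-10, 1, -6): A returns 2, B returns 2
import Mathlib
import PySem

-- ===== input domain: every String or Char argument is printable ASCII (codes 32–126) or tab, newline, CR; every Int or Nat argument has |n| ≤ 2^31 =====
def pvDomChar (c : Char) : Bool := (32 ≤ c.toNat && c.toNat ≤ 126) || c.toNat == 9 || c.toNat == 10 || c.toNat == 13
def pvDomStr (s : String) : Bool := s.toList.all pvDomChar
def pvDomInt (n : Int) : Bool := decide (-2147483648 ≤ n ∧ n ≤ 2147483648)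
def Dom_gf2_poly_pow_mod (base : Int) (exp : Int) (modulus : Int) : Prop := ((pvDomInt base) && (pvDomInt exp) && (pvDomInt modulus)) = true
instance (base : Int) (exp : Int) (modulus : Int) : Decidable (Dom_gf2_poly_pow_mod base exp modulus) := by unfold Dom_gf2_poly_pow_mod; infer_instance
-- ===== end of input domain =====

-- B computes base^exp mod modulus over GF(2) by direct divide-and-conquer recursion on the
-- exponent (square the half power, multiply by the reduced base on odd exponents) instead of
-- A's LSB-first loop threading a result accumulator and a running square; same asymptotic cost.

-- ===== PORT A =====
-- poly_degree: bit_length() - 1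
def pvPolyDegree (p : Int) : Int := (PySem.Int.bitLength p : Int) - 1

-- the 'while True' loop of gf2_poly_mod; fuel bitLength a + 1 suffices on the admitted
-- inputs (each pass strictly shrinks the remainder's bit length); it is only a totality guard
def pvModLoop (b : Int) : Nat → Int → Int
  | 0, r => r
  | f+1, r =>
    if pvPolyDegree r < pvPolyDegree b then r
    else pvModLoop b f (PySem.Int.bxor r (b <<< (pvPolyDegree r - pvPolyDegree b).toNat))

-- gf2_poly_mod; Python raises ValueError on b = 0 (excluded by Pre_), the 0 is a totality guard
def pvGf2Mod (a b : Int) : Int :=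
  if b = 0 then 0 else pvModLoop b (PySem.Int.bitLength a + 1) a

-- the 'while a' loop of gf2_poly_mul; fuel bitLength a suffices on the admitted inputs
def pvMulLoop : Nat → Int → Int → Int → Int
  | 0, _, result, _ => result
  | f+1, a, result, tb =>
    if a = 0 then result
    else pvMulLoop f (a >>> (1:Nat))
           (if PySem.Int.band a 1 ≠ 0 then PySem.Int.bxor result tb else result) (tb <<< (1:Nat))

def pvGf2Mul (a b : Int) : Int := pvMulLoop (PySem.Int.bitLength a) a 0 b

-- the 'while exp > 0' loop of gf2_poly_pow_mod; fuel bitLength exp + 1 suffices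
def pvPowLoop (m : Int) : Nat → Int → Int → Int → Int
  | 0, result, _, _ => result
  | f+1, result, base, e =>
    if e ≤ 0 then result
    else pvPowLoop m f
      (if PySem.Int.band e 1 ≠ 0 then pvGf2Mod (pvGf2Mul result base) m else result)
      (pvGf2Mod (pvGf2Mul base base) m)
      (e >>> (1:Nat))

def gf2_poly_pow_mod (base : Int) (exp : Int) (modulus : Int) : Int :=
  pvPowLoop modulus (PySem.Int.bitLength exp + 1) 1 (pvGf2Mod base modulus) exp

-- ===== PORT B =====
-- pw: divide-and-conquer on the exponent (Source B's inner function; Source B reuses the module's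
-- gf2_poly_mod / gf2_poly_mul helpers, which are ported above and shared with port A)
def pvPowRec (b0 : Int) (m : Int) (e : Int) : Int :=
  if e ≤ 0 then 1
  else
    let s := pvGf2Mod (pvGf2Mul (pvPowRec b0 m (e >>> (1:Nat))) (pvPowRec b0 m (e >>> (1:Nat)))) m
    if PySem.Int.band e 1 ≠ 0 then pvGf2Mod (pvGf2Mul s b0) m else s
termination_by e.toNat
decreasing_by
  all_goals
    have h2 : e >>> (1:Nat) = e / 2 := by rw [Int.shiftRight_eq_div_pow]; norm_num
    rw [h2]; omega

def gf2_poly_pow_mod_alt (base : Int) (exp : Int) (modulus : Int) : Int :=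
  pvPowRec (pvGf2Mod base modulus) modulus exp

-- ===== PRECONDITION & SPEC =====
-- Pre_ excludes non-positive modulus and negative base: modulus = 0 raises ValueError, and for
-- a negative base or negative modulus the bit-twiddling division loop runs on Python's infinite
-- two's-complement integers and usually never terminates (e.g. gf2_poly_pow_mod(-5, 3, 7) and
-- gf2_poly_pow_mod(3, 2, -5) loop forever), so any value A happens to return there is accidental.
def Pre_gf2_poly_pow_mod (base : Int) (exp : Int) (modulus : Int) : Prop :=
  0 ≤ base ∧ 0 < modulus
instance (base : Int) (exp : Int) (modulus : Int) : Decidable (Pre_gf2_poly_pow_mod base exp modulus) := by unfold Pre_gf2_poly_pow_mod; infer_instance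

def pvWitness_gf2_poly_pow_mod : Int × Int × Int := (3, 5, 7)

def Spec_gf2_poly_pow_mod (base : Int) (exp : Int) (modulus : Int) (out : Int) : Prop := out = gf2_poly_pow_mod_alt base exp modulus
instance (base : Int) (exp : Int) (modulus : Int) (out : Int) : Decidable (Spec_gf2_poly_pow_mod base exp modulus out) := by unfold Spec_gf2_poly_pow_mod; infer_instance

-- ===== CLAIM (what is proved, stated in full; the proofs are below) =====
def Claim_equal_gf2_poly_pow_mod : Prop := ∀ (base : Int) (exp : Int) (modulus : Int), Dom_gf2_poly_pow_mod base exp modulus → Pre_gf2_poly_pow_mod base exp modulus → Spec_gf2_poly_pow_mod base exp modulus (gf2_poly_pow_mod base exp modulus)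

-- ===== LEMMAS AND PROOFS =====

-- ---- Nat mirrors of the ports (on the admitted inputs all data is non-negative) ----
def nModLoop (b : Nat) : Nat → Nat → Nat
  | 0, r => r
  | f+1, r => if r.size < b.size then r else nModLoop b f (r ^^^ (b <<< (r.size - b.size)))

def nMod (a b : Nat) : Nat := if b = 0 then 0 else nModLoop b (a.size + 1) a

def nMulLoop : Nat → Nat → Nat → Nat → Nat
  | 0, _, result, _ => result
  | f+1, a, result, tb =>
    if a = 0 then result
    else nMulLoop f (a >>> 1) (if a &&& 1 ≠ 0 then result ^^^ tb else result) (tb <<< 1)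

def nMul (a b : Nat) : Nat := nMulLoop a.size a 0 b

def nPowLoop (m : Nat) : Nat → Nat → Nat → Nat → Nat
  | 0, result, _, _ => result
  | f+1, result, b, e =>
    if e = 0 then result
    else nPowLoop m f (if e &&& 1 ≠ 0 then nMod (nMul result b) m else result)
           (nMod (nMul b b) m) (e >>> 1)

def nPowRec (b0 : Nat) (m : Nat) (e : Nat) : Nat :=
  if e = 0 then 1
  else
    let s := nMod (nMul (nPowRec b0 m (e / 2)) (nPowRec b0 m (e / 2))) m
    if e &&& 1 ≠ 0 then nMod (nMul s b0) m else s
termination_by e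
decreasing_by all_goals omega

-- ---- PySem.Int.bitLength of a Nat cast is Nat.size ----
theorem pv_bitLength_eq_size (n : Nat) : PySem.Int.bitLength (n : Int) = n.size := by
  rcases Nat.eq_zero_or_pos n with h | h
  · subst h; simp
  · apply le_antisymm
    · by_contra hlt
      push_neg at hlt
      have hne : (n : Int) ≠ 0 := by exact_mod_cast h.ne'
      have h1 := PySem.Int.two_pow_bitLength_le (n : Int) hne
      rw [Int.natAbs_natCast] at h1
      have h2 : 2 ^ n.size ≤ 2 ^ (PySem.Int.bitLength (n : Int) - 1) :=
        Nat.pow_le_pow_right (by norm_num) (by omega)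
      have h3 : n < 2 ^ n.size := Nat.lt_size_self n
      omega
    · exact Nat.size_le.mpr (by simpa using PySem.Int.lt_two_pow_bitLength (n : Int))

-- ---- cast bridges: the Int ports equal the Nat mirrors on non-negative data ----
theorem pvModLoop_natCast (b : Nat) (f : Nat) (r : Nat) :
    pvModLoop (b : Int) f (r : Int) = ((nModLoop b f r : Nat) : Int) := by
  induction f generalizing r with
  | zero => rfl
  | succ f ih =>
    simp only [pvModLoop, nModLoop, pvPolyDegree, pv_bitLength_eq_size]
    by_cases h : r.size < b.size
    · simp [h]
    · have harg : (((r.size : Int) - 1) - ((b.size : Int) - 1)).toNat = r.size - b.size := by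
        omega
      rw [if_neg (by omega), if_neg h, harg, ← Int.natCast_shiftLeft,
        PySem.Int.bxor_natCast, ih]

theorem pvGf2Mod_natCast (a b : Nat) (hb : b ≠ 0) :
    pvGf2Mod (a : Int) (b : Int) = ((nMod a b : Nat) : Int) := by
  rw [pvGf2Mod, nMod, if_neg (by exact_mod_cast hb), if_neg hb,
    pv_bitLength_eq_size, pvModLoop_natCast]

theorem pvMulLoop_natCast (f : Nat) (a result tb : Nat) :
    pvMulLoop f (a : Int) (result : Int) (tb : Int) = ((nMulLoop f a result tb : Nat) : Int) := by
  induction f generalizing a result tb with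
  | zero => rfl
  | succ f ih =>
    simp only [pvMulLoop, nMulLoop]
    by_cases h : a = 0
    · simp [h]
    · rw [if_neg (by exact_mod_cast h), if_neg h]
      have h1 : PySem.Int.band (a : Int) 1 = ((a &&& 1 : Nat) : Int) := by
        exact_mod_cast PySem.Int.band_natCast a 1
      have h2 : (a : Int) >>> (1:Nat) = ((a >>> 1 : Nat) : Int) := (Int.natCast_shiftRight a 1).symm
      have h3 : (tb : Int) <<< (1:Nat) = ((tb <<< 1 : Nat) : Int) := (Int.natCast_shiftLeft tb 1).symm
      rw [h1, h2, h3]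
      by_cases hb : (a &&& 1) = 0
      · rw [if_neg (by simp [hb]), if_neg (by simp [hb]), ih]
      · rw [if_pos (by exact_mod_cast hb), if_pos hb, PySem.Int.bxor_natCast, ih]

theorem pvGf2Mul_natCast (a b : Nat) :
    pvGf2Mul (a : Int) (b : Int) = ((nMul a b : Nat) : Int) := by
  rw [pvGf2Mul, nMul, pv_bitLength_eq_size, ← Nat.cast_zero, pvMulLoop_natCast]

theorem pvPowLoop_natCast (m : Nat) (hm : m ≠ 0) (f : Nat) (result b e : Nat) :
    pvPowLoop (m : Int) f (result : Int) (b : Int) (e : Int) =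
      ((nPowLoop m f result b e : Nat) : Int) := by
  induction f generalizing result b e with
  | zero => rfl
  | succ f ih =>
    simp only [pvPowLoop, nPowLoop]
    by_cases h : e = 0
    · simp [h]
    · rw [if_neg (show ¬ ((e : Nat) : Int) ≤ 0 by omega), if_neg h]
      have h1 : PySem.Int.band (e : Int) 1 = ((e &&& 1 : Nat) : Int) := by
        exact_mod_cast PySem.Int.band_natCast e 1
      have h2 : (e : Int) >>> (1:Nat) = ((e >>> 1 : Nat) : Int) := (Int.natCast_shiftRight e 1).symm
      rw [h1, h2, pvGf2Mul_natCast b b, pvGf2Mod_natCast _ m hm]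
      by_cases hb : (e &&& 1) = 0
      · rw [if_neg (by simp [hb]), if_neg (by simp [hb]), ih]
      · rw [if_pos (by exact_mod_cast hb), if_pos hb, pvGf2Mul_natCast, pvGf2Mod_natCast _ m hm,
          ih]

theorem pvPowRec_natCast (b0 m : Nat) (hm : m ≠ 0) (e : Nat) :
    pvPowRec (b0 : Int) (m : Int) (e : Int) = ((nPowRec b0 m e : Nat) : Int) := by
  induction e using Nat.strong_induction_on with
  | _ e ih =>
    rw [pvPowRec, nPowRec]
    by_cases h : e = 0
    · simp [h]
    · rw [if_neg (show ¬ ((e : Nat) : Int) ≤ 0 by omega), if_neg h]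
      have h2 : (e : Int) >>> (1:Nat) = ((e / 2 : Nat) : Int) := by
        rw [← Nat.shiftRight_one, ← Int.natCast_shiftRight]
      have h1 : PySem.Int.band (e : Int) 1 = ((e &&& 1 : Nat) : Int) := by
        exact_mod_cast PySem.Int.band_natCast e 1
      simp only [h2, h1, ih (e / 2) (by omega), pvGf2Mul_natCast, pvGf2Mod_natCast _ m hm]
      by_cases hb : (e &&& 1) = 0
      · simp [hb]
      · rw [if_pos (by exact_mod_cast hb), if_pos hb]

-- ---- the GF(2)[x] reading of a bit-encoded polynomial ----
noncomputable def phi (n : Nat) : Polynomial (ZMod 2) :=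
  if n = 0 then 0 else Polynomial.C ((n % 2 : Nat) : ZMod 2) + Polynomial.X * phi (n / 2)
termination_by n
decreasing_by omega

theorem phi_zero : phi 0 = 0 := by rw [phi]; rfl

theorem phi_one : phi 1 = 1 := by rw [phi]; simp [phi_zero]

theorem phi_coeff (n k : Nat) : (phi n).coeff k = if n.testBit k then 1 else 0 := by
  induction n using Nat.strong_induction_on generalizing k with
  | _ n ih =>
    by_cases h : n = 0
    · simp [h, phi_zero, Nat.zero_testBit]
    · rw [phi, if_neg h]
      cases k with
      | zero =>
        rw [Polynomial.coeff_add, Polynomial.coeff_C, Polynomial.coeff_X_mul_zero,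
          Nat.testBit_zero]
        rcases Nat.mod_two_eq_zero_or_one n with h2 | h2 <;> simp [h2]
      | succ k =>
        rw [Polynomial.coeff_add, Polynomial.coeff_C, Polynomial.coeff_X_mul,
          ih (n / 2) (by omega), Nat.testBit_add_one]
        simp

theorem phi_inj {a b : Nat} (h : phi a = phi b) : a = b := by
  apply Nat.eq_of_testBit_eq
  intro i
  have hc := congrArg (fun p => Polynomial.coeff p i) h
  simp only [phi_coeff] at hc
  by_cases h1 : a.testBit i <;> by_cases h2 : b.testBit i <;>
    simp only [h1, h2, if_true] at hc ⊢
  · exact absurd hc (by decide)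
  · exact absurd hc (by decide)

theorem phi_xor (a b : Nat) : phi (a ^^^ b) = phi a + phi b := by
  apply Polynomial.ext
  intro k
  rw [Polynomial.coeff_add, phi_coeff, phi_coeff, phi_coeff, Nat.testBit_xor]
  cases h1 : a.testBit k <;> cases h2 : b.testBit k <;> simp <;> decide

theorem phi_two_mul (n : Nat) : phi (2 * n) = Polynomial.X * phi n := by
  by_cases h : n = 0
  · simp [h, phi_zero]
  · rw [phi, if_neg (by omega)]
    have h1 : 2 * n % 2 = 0 := by omega
    have h2 : 2 * n / 2 = n := by omega
    simp [h1, h2]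

theorem phi_shiftLeft (n k : Nat) : phi (n <<< k) = Polynomial.X ^ k * phi n := by
  induction k with
  | zero => simp
  | succ k ih =>
    have h : n <<< (k + 1) = 2 * (n <<< k) := by
      rw [Nat.shiftLeft_eq, Nat.shiftLeft_eq, pow_succ]; ring
    rw [h, phi_two_mul, ih, pow_succ]; ring

-- ---- phi of the multiplication loop ----
theorem size_half_succ (a : Nat) (h : a ≠ 0) : a.size = (a / 2).size + 1 := by
  have h1 := PySem.Int.bitLength_natCast (m := a) (by omega)
  rwa [pv_bitLength_eq_size, pv_bitLength_eq_size] at h1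

theorem phi_nMulLoop (f : Nat) (a result tb : Nat) (hf : a.size ≤ f) :
    phi (nMulLoop f a result tb) = phi result + phi a * phi tb := by
  induction f generalizing a result tb with
  | zero =>
    have ha : a = 0 := Nat.size_eq_zero.mp (by omega)
    simp [nMulLoop, ha, phi_zero]
  | succ f ih =>
    rw [nMulLoop]
    by_cases h : a = 0
    · simp [h, phi_zero]
    · rw [if_neg h]
      have hsz : (a / 2).size ≤ f := by have := size_half_succ a h; omega
      rw [Nat.shiftRight_one, ih (a / 2) _ _ hsz]
      have htb : phi (tb <<< 1) = Polynomial.X * phi tb := by rw [phi_shiftLeft, pow_one]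
      have hres : phi (if a &&& 1 ≠ 0 then result ^^^ tb else result)
          = phi result + Polynomial.C ((a % 2 : Nat) : ZMod 2) * phi tb := by
        rcases Nat.mod_two_eq_zero_or_one a with h2 | h2
        · simp [Nat.and_one_is_mod, h2]
        · simp [Nat.and_one_is_mod, h2, phi_xor]
      rw [hres, htb]
      have hA : phi a = Polynomial.C ((a % 2 : Nat) : ZMod 2) + Polynomial.X * phi (a / 2) := by
        rw [phi, if_neg h]
      rw [hA]
      ring

theorem phi_nMul (a b : Nat) : phi (nMul a b) = phi a * phi b := by
  rw [nMul, phi_nMulLoop a.size a 0 b le_rfl, phi_zero, zero_add]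

-- ---- degree / top-bit facts ----
theorem testBit_top (n : Nat) (h : n ≠ 0) : n.testBit (n.size - 1) = true := by
  have hp : 0 < n.size := Nat.size_pos.mpr (Nat.pos_of_ne_zero h)
  have h1 : 2 ^ (n.size - 1) ≤ n := Nat.lt_size.mp (by omega)
  have h2 : n < 2 ^ n.size := Nat.lt_size_self n
  have h2' : n < 2 ^ (n.size - 1) * 2 := by
    have hs : n.size = (n.size - 1) + 1 := by omega
    rw [hs, pow_succ] at h2
    exact h2
  have hdiv : n / 2 ^ (n.size - 1) = 1 := Nat.div_eq_of_lt_le (by omega) (by omega)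
  rw [Nat.testBit_eq_decide_div_mod_eq, hdiv]
  rfl

theorem lt_pow_of_top_false (x s : Nat) (hs : 0 < s) (hx : x < 2 ^ s)
    (hb : x.testBit (s - 1) = false) : x < 2 ^ (s - 1) := by
  by_contra hge
  push_neg at hge
  have hx' : x < 2 ^ (s - 1) * 2 := by
    have h2 : s = (s - 1) + 1 := by omega
    rw [h2, pow_succ] at hx
    exact hx
  have hdiv : x / 2 ^ (s - 1) = 1 := Nat.div_eq_of_lt_le (by omega) (by omega)
  rw [Nat.testBit_eq_decide_div_mod_eq, hdiv] at hb
  simp at hb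

theorem size_xor_step (m r : Nat) (hm : m ≠ 0) (h : m.size ≤ r.size) :
    (r ^^^ (m <<< (r.size - m.size))).size < r.size := by
  have hmpos : 0 < m.size := Nat.size_pos.mpr (Nat.pos_of_ne_zero hm)
  have hrpos : 0 < r.size := by omega
  have hrne : r ≠ 0 := by
    intro h0
    rw [h0, Nat.size_zero] at hrpos
    omega
  have hshift : m <<< (r.size - m.size) < 2 ^ r.size := by
    rw [Nat.shiftLeft_eq]
    calc m * 2 ^ (r.size - m.size) < 2 ^ m.size * 2 ^ (r.size - m.size) :=
          (Nat.mul_lt_mul_right (Nat.two_pow_pos _)).mpr (Nat.lt_size_self m)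
      _ = 2 ^ r.size := by rw [← pow_add]; congr 1; omega
  have hr2 : r < 2 ^ r.size := Nat.lt_size_self r
  have hxlt : r ^^^ (m <<< (r.size - m.size)) < 2 ^ r.size := Nat.xor_lt_two_pow hr2 hshift
  have htop : (r ^^^ (m <<< (r.size - m.size))).testBit (r.size - 1) = false := by
    rw [Nat.testBit_xor]
    have h1 : r.testBit (r.size - 1) = true := testBit_top r hrne
    have h2 : (m <<< (r.size - m.size)).testBit (r.size - 1) = true := by
      rw [Nat.testBit_shiftLeft]
      have ha : r.size - 1 - (r.size - m.size) = m.size - 1 := by omega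
      have hk : r.size - m.size ≤ r.size - 1 := by omega
      simp [hk, ha, testBit_top m hm]
    rw [h1, h2]
    rfl
  have hlt := lt_pow_of_top_false _ r.size hrpos hxlt htop
  exact Nat.lt_of_le_of_lt (Nat.size_le.mpr hlt) (by omega)

theorem nModLoop_size (m : Nat) (hm : m ≠ 0) (f : Nat) (r : Nat) (hf : r.size ≤ f) :
    (nModLoop m f r).size < m.size := by
  induction f generalizing r with
  | zero =>
    have : r = 0 := Nat.size_eq_zero.mp (by omega)
    simpa [nModLoop, this] using Nat.size_pos.mpr (Nat.pos_of_ne_zero hm)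
  | succ f ih =>
    rw [nModLoop]
    by_cases h : r.size < m.size
    · simp [h]
    · rw [if_neg h]
      exact ih _ (by have := size_xor_step m r hm (le_of_not_gt h); omega)

theorem nModLoop_cong (m : Nat) (f : Nat) (r : Nat) :
    ∃ c, phi (nModLoop m f r) = phi r + phi m * c := by
  induction f generalizing r with
  | zero => exact ⟨0, by simp [nModLoop]⟩
  | succ f ih =>
    rw [nModLoop]
    by_cases h : r.size < m.size
    · exact ⟨0, by simp [h]⟩
    · rw [if_neg h]
      obtain ⟨c, hc⟩ := ih (r ^^^ (m <<< (r.size - m.size)))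
      refine ⟨Polynomial.X ^ (r.size - m.size) + c, ?_⟩
      rw [hc, phi_xor, phi_shiftLeft]
      ring

theorem nMod_cong (a m : Nat) (hm : m ≠ 0) : ∃ c, phi (nMod a m) = phi a + phi m * c := by
  rw [nMod, if_neg hm]
  exact nModLoop_cong m _ a

theorem nMod_size (a m : Nat) (hm : m ≠ 0) : (nMod a m).size < m.size := by
  rw [nMod, if_neg hm]
  exact nModLoop_size m hm _ a (by omega)

theorem phi_degree_lt (n : Nat) : (phi n).degree < (n.size : ℕ) := by
  rw [Polynomial.degree_lt_iff_coeff_zero]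
  intro m hm
  have hm' : n.size ≤ m := by exact_mod_cast hm
  rw [phi_coeff]
  have hlt : n < 2 ^ m :=
    lt_of_lt_of_le (Nat.lt_size_self n) (Nat.pow_le_pow_right (by norm_num) hm')
  simp [Nat.testBit_lt_two_pow hlt]

theorem phi_degree_ge (n : Nat) (h : n ≠ 0) : ((n.size - 1 : ℕ) : WithBot ℕ) ≤ (phi n).degree := by
  apply Polynomial.le_degree_of_ne_zero
  rw [phi_coeff, testBit_top n h]
  simp only [if_true]
  exact one_ne_zero

theorem reduce_unique (m r1 r2 : Nat) (h1 : r1.size < m.size) (h2 : r2.size < m.size)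
    (c : Polynomial (ZMod 2)) (hc : phi r1 = phi r2 + phi m * c) : r1 = r2 := by
  have hm : m ≠ 0 := by
    intro h0
    rw [h0, Nat.size_zero] at h1
    omega
  have hdvd : phi m ∣ (phi r1 - phi r2) := ⟨c, by rw [hc]; ring⟩
  have hd1 : (phi r1).degree < ((m.size - 1 : ℕ) : WithBot ℕ) :=
    lt_of_lt_of_le (phi_degree_lt r1) (by exact_mod_cast by omega)
  have hd2 : (phi r2).degree < ((m.size - 1 : ℕ) : WithBot ℕ) :=
    lt_of_lt_of_le (phi_degree_lt r2) (by exact_mod_cast by omega)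
  have hdeg : (phi r1 - phi r2).degree < (phi m).degree :=
    lt_of_lt_of_le (lt_of_le_of_lt (Polynomial.degree_sub_le _ _) (max_lt hd1 hd2))
      (phi_degree_ge m hm)
  have hz := Polynomial.eq_zero_of_dvd_of_degree_lt hdvd hdeg
  exact phi_inj (sub_eq_zero.mp hz)

-- ---- the two power algorithms both compute phi base ^ exp modulo phi m ----
theorem add_mul_pow_ex (p q c : Polynomial (ZMod 2)) (n : ℕ) :
    ∃ d, (p + q * c) ^ n = p ^ n + q * d := by
  induction n with
  | zero => exact ⟨0, by simp⟩
  | succ n ih =>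
    obtain ⟨d, hd⟩ := ih
    refine ⟨d * (p + q * c) + p ^ n * c, ?_⟩
    rw [pow_succ, hd]
    ring

theorem nPowLoop_cong (m : Nat) (hm : m ≠ 0) (f : Nat) (res b e : Nat) (hf : e.size ≤ f) :
    ∃ c, phi (nPowLoop m f res b e) = phi res * phi b ^ e + phi m * c := by
  induction f generalizing res b e with
  | zero =>
    have he : e = 0 := Nat.size_eq_zero.mp (by omega)
    exact ⟨0, by simp [nPowLoop, he]⟩
  | succ f ih =>
    rw [nPowLoop]
    by_cases h : e = 0
    · exact ⟨0, by simp [h]⟩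
    · rw [if_neg h, Nat.shiftRight_one]
      have hsz : (e / 2).size ≤ f := by have := size_half_succ e h; omega
      obtain ⟨c, hc⟩ :=
        ih (if e &&& 1 ≠ 0 then nMod (nMul res b) m else res) (nMod (nMul b b) m) (e / 2) hsz
      obtain ⟨cb, hcb⟩ := nMod_cong (nMul b b) m hm
      rw [phi_nMul] at hcb
      have hres : ∃ cr, phi (if e &&& 1 ≠ 0 then nMod (nMul res b) m else res)
          = phi res * phi b ^ (e % 2) + phi m * cr := by
        rcases Nat.mod_two_eq_zero_or_one e with h2 | h2
        · exact ⟨0, by simp [Nat.and_one_is_mod, h2]⟩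
        · obtain ⟨cr, hcr⟩ := nMod_cong (nMul res b) m hm
          rw [phi_nMul] at hcr
          exact ⟨cr, by simp [Nat.and_one_is_mod, h2, hcr, pow_one]⟩
      obtain ⟨cr, hcr⟩ := hres
      obtain ⟨d, hd⟩ := add_mul_pow_ex (phi b ^ 2) (phi m) cb (e / 2)
      have hee : e % 2 + 2 * (e / 2) = e := by omega
      refine ⟨cr * ((phi b ^ 2) ^ (e / 2) + phi m * d) + phi res * phi b ^ (e % 2) * d + c, ?_⟩
      have hpow : phi b ^ (e % 2) * (phi b ^ 2) ^ (e / 2) = phi b ^ e := by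
        rw [← pow_mul, ← pow_add, hee]
      have hbb : phi b * phi b = phi b ^ 2 := (sq (phi b)).symm
      rw [hc, hcr, hcb, hbb, hd, ← hpow]
      ring

theorem nPowLoop_zero_e (m : Nat) (f : Nat) (res b : Nat) : nPowLoop m f res b 0 = res := by
  cases f <;> simp [nPowLoop]

theorem nPowLoop_size (m : Nat) (hm : m ≠ 0) (f : Nat) (res b e : Nat) (he : e ≠ 0)
    (hf : e.size ≤ f) : (nPowLoop m f res b e).size < m.size := by
  induction f generalizing res b e with
  | zero =>
    exact absurd (Nat.size_eq_zero.mp (by omega)) he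
  | succ f ih =>
    rw [nPowLoop, if_neg he, Nat.shiftRight_one]
    by_cases h2 : e / 2 = 0
    · have h1 : e = 1 := by omega
      have hodd : e &&& 1 ≠ 0 := by simp [h1]
      rw [h2, nPowLoop_zero_e, if_pos hodd]
      exact nMod_size _ m hm
    · exact ih _ _ _ h2 (by have := size_half_succ e he; omega)

theorem nPowRec_cong (b0 m : Nat) (hm : m ≠ 0) (e : Nat) :
    ∃ c, phi (nPowRec b0 m e) = phi b0 ^ e + phi m * c := by
  induction e using Nat.strong_induction_on with
  | _ e ih =>
    rw [nPowRec]
    by_cases h : e = 0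
    · exact ⟨0, by simp [h, phi_one]⟩
    · rw [if_neg h]
      obtain ⟨c, hc⟩ := ih (e / 2) (by omega)
      obtain ⟨cs, hcs⟩ := nMod_cong (nMul (nPowRec b0 m (e / 2)) (nPowRec b0 m (e / 2))) m hm
      rw [phi_nMul, hc] at hcs
      rcases Nat.mod_two_eq_zero_or_one e with h2 | h2
      · have heven : ¬ (e &&& 1 ≠ 0) := by simp [Nat.and_one_is_mod, h2]
        rw [if_neg heven]
        refine ⟨2 * phi b0 ^ (e / 2) * c + phi m * c ^ 2 + cs, ?_⟩
        have hpow : (phi b0 ^ (e / 2)) ^ 2 = phi b0 ^ e := by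
          rw [← pow_mul]
          congr 1
          omega
        rw [hcs, ← hpow]
        ring
      · have hodd : e &&& 1 ≠ 0 := by simp [Nat.and_one_is_mod, h2]
        rw [if_pos hodd]
        obtain ⟨ct, hct⟩ :=
          nMod_cong (nMul (nMod (nMul (nPowRec b0 m (e / 2)) (nPowRec b0 m (e / 2))) m) b0) m hm
        rw [phi_nMul, hcs] at hct
        refine ⟨(2 * phi b0 ^ (e / 2) * c + phi m * c ^ 2 + cs) * phi b0 + ct, ?_⟩
        have hpow : (phi b0 ^ (e / 2)) ^ 2 * phi b0 = phi b0 ^ e := by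
          rw [← pow_mul, ← pow_succ]
          congr 1
          omega
        rw [hct, ← hpow]
        ring

theorem nPowRec_size (b0 m : Nat) (hm : m ≠ 0) (e : Nat) (he : e ≠ 0) :
    (nPowRec b0 m e).size < m.size := by
  rw [nPowRec, if_neg he]
  by_cases hb : e &&& 1 ≠ 0
  · rw [if_pos hb]
    exact nMod_size _ m hm
  · rw [if_neg hb]
    exact nMod_size _ m hm

-- ===== VERDICT (by name: the statement is the Claim_ definition above) =====
theorem gf2_poly_pow_mod_spec : Claim_equal_gf2_poly_pow_mod := by
  intro base exp modulus _ hpre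
  obtain ⟨hb, hm⟩ := hpre
  unfold Spec_gf2_poly_pow_mod gf2_poly_pow_mod gf2_poly_pow_mod_alt
  by_cases he : exp ≤ 0
  · rw [pvPowRec, if_pos he]
    simp [pvPowLoop, he]
  · push_neg at he
    have hmne : modulus.toNat ≠ 0 := by omega
    have hmc : ((modulus.toNat : Nat) : Int) = modulus := Int.toNat_of_nonneg (by omega)
    have hbc : ((base.toNat : Nat) : Int) = base := Int.toNat_of_nonneg hb
    have hec : ((exp.toNat : Nat) : Int) = exp := Int.toNat_of_nonneg (by omega)
    have hene : exp.toNat ≠ 0 := by omega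
    have hb0 : pvGf2Mod base modulus = ((nMod base.toNat modulus.toNat : Nat) : Int) := by
      rw [← hbc, ← hmc, pvGf2Mod_natCast base.toNat modulus.toNat hmne]
      simp only [Int.toNat_natCast]
    have hfl : PySem.Int.bitLength exp = exp.toNat.size := by
      rw [← hec, pv_bitLength_eq_size]
      simp only [Int.toNat_natCast]
    rw [hb0, hfl, ← hmc, ← hec, show (1 : Int) = ((1 : Nat) : Int) from rfl]
    simp only [Int.toNat_natCast]
    rw [pvPowLoop_natCast modulus.toNat hmne _ 1 _ exp.toNat,
      pvPowRec_natCast _ modulus.toNat hmne exp.toNat]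
    refine congrArg (fun n : Nat => (n : Int)) ?_
    obtain ⟨c1, hc1⟩ :=
      nPowLoop_cong modulus.toNat hmne (exp.toNat.size + 1) 1 (nMod base.toNat modulus.toNat)
        exp.toNat (by omega)
    obtain ⟨c2, hc2⟩ := nPowRec_cong (nMod base.toNat modulus.toNat) modulus.toNat hmne exp.toNat
    rw [phi_one, one_mul] at hc1
    exact reduce_unique modulus.toNat _ _
      (nPowLoop_size modulus.toNat hmne _ 1 _ exp.toNat hene (by omega))
      (nPowRec_size _ modulus.toNat hmne exp.toNat hene)
      (c1 - c2) (by rw [hc1, hc2]; ring)
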